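-- pv_equiv track=rewrite | github.com/Jennysoares/Estudos | Grafos/Exercicios/Pratica5b.py | popularLista
-- ===== SOURCE A (Python) =====
-- def popularLista(indices, arest, vert):
--     dictLista = dict()
--     for k in indices:
--         conjunto = []
--         for a in arest:
--             if a[0] == k:
--                 conjunto.append(a[1])
--                 valor = vert[a[1]]['degree']
--                 valor = valor + 1
--                 vert[a[1]]['degree'] = valor
--
--         dictLista.update({k: conjunto})
--
--     return dictLista
-- ===== SOURCE B (Python) =====
-- def popularLista(indices, arest, vert):
--     # Single pass over the edges, grouping targets by source.
--     # Side effect on vert differs from A when indices has duplicates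
--     # (A increments a degree once per duplicate occurrence); the RETURN
--     # value is identical.
--     dictLista = {k: [] for k in indices}
--     keys = set(indices)
--     for s, t in arest:
--         if s in keys:
--             dictLista[s].append(t)
--             vert[t]['degree'] += 1
--     return dictLista
-- ===== Notes on version B (the rewrite author's own statement) =====
-- stated objective: faster
-- what changed: Replaces the nested loop (for every index, a full scan of the edge list) by a dict pre-initialised in indices order plus one single pass over the edges that appends each target to its source's bucket via a set membership test.
import Mathlib
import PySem

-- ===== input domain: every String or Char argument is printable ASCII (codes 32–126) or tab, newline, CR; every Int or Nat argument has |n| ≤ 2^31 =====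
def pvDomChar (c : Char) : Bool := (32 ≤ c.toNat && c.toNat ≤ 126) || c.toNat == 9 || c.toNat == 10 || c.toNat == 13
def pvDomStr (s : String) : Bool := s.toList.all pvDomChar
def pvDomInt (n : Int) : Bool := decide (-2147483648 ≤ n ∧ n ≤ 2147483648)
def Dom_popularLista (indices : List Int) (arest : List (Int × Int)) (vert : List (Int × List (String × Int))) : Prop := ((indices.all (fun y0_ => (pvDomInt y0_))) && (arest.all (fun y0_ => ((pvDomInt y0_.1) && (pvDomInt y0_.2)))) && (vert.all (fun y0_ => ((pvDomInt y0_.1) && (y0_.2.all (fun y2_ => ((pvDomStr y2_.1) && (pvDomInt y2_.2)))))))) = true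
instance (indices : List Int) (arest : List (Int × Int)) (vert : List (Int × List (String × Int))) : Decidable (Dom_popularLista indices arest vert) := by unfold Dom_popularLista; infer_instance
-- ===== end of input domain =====

-- B replaces A's per-index scan of the whole edge list by one single pass over the
-- edges grouping targets by source (objective: faster, asymptotic).
-- Both Pythons MUTATE vert in place (degree increments); the equivalence proved here is
-- about the RETURN value only (which does not depend on vert). When indices contains
-- duplicates A increments a matched degree once per duplicate occurrence while B
-- increments it once; the returned dict is identical.

-- ===== PORT A =====
-- vert[a[1]]['degree'] read/write: lookups ported with getD defaults; inside Pre_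
-- both keys exist, so the port is exact there (Python raises KeyError exactly
-- where a key is missing — those inputs are excluded by Pre_popularLista).
def popularLista (indices : List Int) (arest : List (Int × Int)) (vert : List (Int × List (String × Int))) : List (Int × List Int) :=
  let step := fun (st : PySem.Dict Int (List Int) × PySem.Dict Int (PySem.Dict String Int)) (k : Int) =>
    let inner := arest.foldl
      (fun (s : List Int × PySem.Dict Int (PySem.Dict String Int)) (a : Int × Int) =>
        if a.1 == k then
          let conjunto := s.1 ++ [a.2]
          let row := s.2.getD a.2 PySem.Dict.empty
          let valor := row.getD "degree" 0
          let valor := valor + 1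
          (conjunto, s.2.insert a.2 (row.insert "degree" valor))
        else s)
      ([], st.2)
    (st.1.insert k inner.1, inner.2)
  let final := indices.foldl step (PySem.Dict.empty, PySem.Dict.mk (vert.map (fun p => (p.1, PySem.Dict.mk p.2))))
  final.1.items

-- ===== PORT B =====
def popularLista_alt (indices : List Int) (arest : List (Int × Int)) (vert : List (Int × List (String × Int))) : List (Int × List Int) :=
  let dict0 : PySem.Dict Int (List Int) := indices.foldl (fun d k => d.insert k []) PySem.Dict.empty
  let keys : PySem.Set Int := PySem.Set.ofList indices
  let final := arest.foldl
    (fun (st : PySem.Dict Int (List Int) × PySem.Dict Int (PySem.Dict String Int)) (a : Int × Int) =>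
      if PySem.Set.contains keys a.1 then
        let row := st.2.getD a.2 PySem.Dict.empty
        (st.1.modify a.1 [] (fun v => v ++ [a.2]),
         st.2.insert a.2 (row.insert "degree" (row.getD "degree" 0 + 1)))
      else st)
    (dict0, PySem.Dict.mk (vert.map (fun p => (p.1, PySem.Dict.mk p.2))))
  final.1.items

-- ===== PRECONDITION & SPEC =====
-- Pre_ excludes exactly the inputs on which both Pythons raise KeyError: an edge whose
-- source occurs in indices but whose target is not a key of vert, or whose target's row
-- has no 'degree' key.
def Pre_popularLista (indices : List Int) (arest : List (Int × Int)) (vert : List (Int × List (String × Int))) : Prop :=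
  ∀ a ∈ arest, a.1 ∈ indices → ∃ p ∈ vert, p.1 = a.2 ∧ ∃ q ∈ p.2, q.1 = "degree"
instance (indices : List Int) (arest : List (Int × Int)) (vert : List (Int × List (String × Int))) : Decidable (Pre_popularLista indices arest vert) := by unfold Pre_popularLista; infer_instance

def pvWitness_popularLista : List Int × (List (Int × Int)) × (List (Int × List (String × Int))) :=
  ([1, 3], [(1, 2), (3, 2), (0, 1)], [(2, [("degree", 0)])])

def Spec_popularLista (indices : List Int) (arest : List (Int × Int)) (vert : List (Int × List (String × Int))) (out : List (Int × List Int)) : Prop := out = popularLista_alt indices arest vert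
instance (indices : List Int) (arest : List (Int × Int)) (vert : List (Int × List (String × Int))) (out : List (Int × List Int)) : Decidable (Spec_popularLista indices arest vert out) := by unfold Spec_popularLista; infer_instance

-- ===== CLAIM (what is proved, stated in full; the proofs are below) =====
def Claim_equal_popularLista : Prop := ∀ (indices : List Int) (arest : List (Int × Int)) (vert : List (Int × List (String × Int))), Dom_popularLista indices arest vert → Pre_popularLista indices arest vert → Spec_popularLista indices arest vert (popularLista indices arest vert)

-- ===== LEMMAS AND PROOFS =====

-- targets of the edges leaving k, in edge order
def pvGroup (arest : List (Int × Int)) (k : Int) : List Int :=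
  (arest.filter (fun a => a.1 == k)).map (·.2)

-- A's outer loop: the dict component ignores the threaded vert component.
theorem popularLista_fst (indices : List Int) (arest : List (Int × Int))
    (d : PySem.Dict Int (List Int)) (v : PySem.Dict Int (PySem.Dict String Int)) :
    (indices.foldl
      (fun (st : PySem.Dict Int (List Int) × PySem.Dict Int (PySem.Dict String Int)) (k : Int) =>
        let inner := arest.foldl
          (fun (s : List Int × PySem.Dict Int (PySem.Dict String Int)) (a : Int × Int) =>
            if a.1 == k then
              let conjunto := s.1 ++ [a.2]
              let row := s.2.getD a.2 PySem.Dict.empty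
              let valor := row.getD "degree" 0
              let valor := valor + 1
              (conjunto, s.2.insert a.2 (row.insert "degree" valor))
            else s)
          ([], st.2)
        (st.1.insert k inner.1, inner.2)) (d, v)).1
    = indices.foldl (fun d k => d.insert k (pvGroup arest k)) d := by
  induction indices generalizing d v with
  | nil => rfl
  | cons k rest ih =>
    simp only [List.foldl_cons]
    rw [ih]
    congr 2
    have hsplit : (arest.foldl
        (fun (s : List Int × PySem.Dict Int (PySem.Dict String Int)) (a : Int × Int) =>
          if a.1 == k then
            let conjunto := s.1 ++ [a.2]
            let row := s.2.getD a.2 PySem.Dict.empty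
            let valor := row.getD "degree" 0
            let valor := valor + 1
            (conjunto, s.2.insert a.2 (row.insert "degree" valor))
          else s)
        ([], v)).1
        = arest.foldl (fun (c : List Int) (a : Int × Int) => if a.1 == k then c ++ [a.2] else c) [] := by
      have : ∀ (es : List (Int × Int)) (c : List Int) (w : PySem.Dict Int (PySem.Dict String Int)),
          (es.foldl
            (fun (s : List Int × PySem.Dict Int (PySem.Dict String Int)) (a : Int × Int) =>
              if a.1 == k then
                let conjunto := s.1 ++ [a.2]
                let row := s.2.getD a.2 PySem.Dict.empty
                let valor := row.getD "degree" 0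
                let valor := valor + 1
                (conjunto, s.2.insert a.2 (row.insert "degree" valor))
              else s)
            (c, w)).1
          = es.foldl (fun (c : List Int) (a : Int × Int) => if a.1 == k then c ++ [a.2] else c) c := by
        intro es
        induction es with
        | nil => intro c w; rfl
        | cons a es ih2 =>
          intro c w
          simp only [List.foldl_cons]
          by_cases h : (a.1 == k) = true
          · simp only [if_pos h]; exact ih2 _ _
          · simp only [if_neg h]; exact ih2 _ _
      exact this arest [] v
    rw [hsplit, PySem.List.foldl_append_if]
    rfl

-- value of A's accumulated dict at a key
theorem getD_foldl_insert_group (g : Int → List Int) (l : List Int)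
    (d : PySem.Dict Int (List Int)) (k : Int) :
    (l.foldl (fun d k => d.insert k (g k)) d).getD k []
      = if k ∈ l then g k else d.getD k [] := by
  induction l generalizing d with
  | nil => simp
  | cons a l ih =>
    simp only [List.foldl_cons, ih]
    by_cases hl : k ∈ l
    · simp [hl]
    · by_cases hk : k = a
      · subst hk; simp [hl, PySem.Dict.getD_insert_self]
      · rw [PySem.Dict.getD_insert_of_ne d (g a) [] hk]; simp [hl, hk]

-- Set.update leaves a set unchanged when everything added is already in it
theorem set_update_of_mem (s : PySem.Set Int) (xs : List Int)
    (h : ∀ x ∈ xs, PySem.Set.contains s x = true) : PySem.Set.update s xs = s := by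
  induction xs generalizing s with
  | nil => rfl
  | cons x xs ih =>
    have hx := h x (by simp)
    simp only [PySem.Set.update, List.foldl_cons]
    have hadd : PySem.Set.add s x = s := by unfold PySem.Set.add; rw [if_pos hx]
    rw [hadd]
    exact ih s (fun y hy => h y (by simp [hy]))

-- B's edge loop: the dict component ignores the threaded vert component.
theorem popularLista_alt_fst (keys : PySem.Set Int) (arest : List (Int × Int))
    (d : PySem.Dict Int (List Int)) (v : PySem.Dict Int (PySem.Dict String Int)) :
    (arest.foldl
      (fun (st : PySem.Dict Int (List Int) × PySem.Dict Int (PySem.Dict String Int)) (a : Int × Int) =>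
        if PySem.Set.contains keys a.1 then
          let row := st.2.getD a.2 PySem.Dict.empty
          (st.1.modify a.1 [] (fun v => v ++ [a.2]),
           st.2.insert a.2 (row.insert "degree" (row.getD "degree" 0 + 1)))
        else st) (d, v)).1
    = arest.foldl (fun d (a : Int × Int) =>
        if PySem.Set.contains keys a.1 then d.modify a.1 [] (fun v => v ++ [a.2]) else d) d := by
  induction arest generalizing d v with
  | nil => rfl
  | cons a es ih =>
    simp only [List.foldl_cons]
    by_cases h : PySem.Set.contains keys a.1 = true
    · simp only [if_pos h]; exact ih _ _
    · simp only [if_neg h]; exact ih _ _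

theorem popularLista_spec' (indices : List Int) (arest : List (Int × Int))
    (vert : List (Int × List (String × Int))) :
    popularLista indices arest vert = popularLista_alt indices arest vert := by
  unfold popularLista popularLista_alt
  simp only
  rw [popularLista_fst, popularLista_alt_fst]
  -- names for the two final dicts
  set dA := indices.foldl (fun d k => d.insert k (pvGroup arest k)) PySem.Dict.empty with hdA
  set d0 : PySem.Dict Int (List Int) :=
    indices.foldl (fun d k => d.insert k []) PySem.Dict.empty with hd0
  set dB := arest.foldl (fun d (a : Int × Int) =>
      if PySem.Set.contains (PySem.Set.ofList indices) a.1
      then d.modify a.1 [] (fun v => v ++ [a.2]) else d) d0 with hdB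
  -- push the guard into a filter of the edge list
  have hBfilter : dB = (arest.filter
      (fun a => PySem.Set.contains (PySem.Set.ofList indices) a.1)).foldl
      (fun d (a : Int × Int) => d.modify a.1 [] (fun v => v ++ [a.2])) d0 := by
    rw [hdB, PySem.List.foldl_if_eq_foldl_filter]
  -- keys
  have hkeys0 : d0.keys = PySem.Set.ofList indices := by
    rw [hd0]
    rw [PySem.Dict.keys_foldl_insert (f := fun _ _ => ([] : List Int))]
    simp [PySem.Set.update, PySem.Set.ofList_eq_foldl]
  have hkeysA : dA.keys = PySem.Set.ofList indices := by
    rw [hdA]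
    rw [PySem.Dict.keys_foldl_insert (f := fun _ k => pvGroup arest k)]
    simp [PySem.Set.update, PySem.Set.ofList_eq_foldl]
  have hkeysB : dB.keys = PySem.Set.ofList indices := by
    rw [hBfilter]
    rw [PySem.Dict.keys_foldl_modify_key (key := fun a : Int × Int => a.1)
      (d0 := []) (f := fun _ a => fun v => v ++ [a.2])]
    rw [hkeys0, set_update_of_mem]
    intro x hx
    simp only [List.mem_map, List.mem_filter] at hx
    obtain ⟨a, ⟨_, ha⟩, rfl⟩ := hx
    exact ha
  have hndA : dA.keys.Nodup := by
    rw [hdA]; exact PySem.Dict.nodup_keys_foldl_insert _ _ _ (by simp)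
  have hndB : dB.keys.Nodup := by
    rw [hBfilter]
    exact PySem.Dict.nodup_keys_foldl_modify_key _ _ _ _ _
      (by rw [hkeys0]; exact PySem.Set.nodup_ofList _)
  -- pointwise values agree on the (common) keys
  have hval : ∀ k ∈ indices, dA.getD k [] = dB.getD k [] := by
    intro k hk
    have hA : dA.getD k [] = pvGroup arest k := by
      rw [hdA, getD_foldl_insert_group]; simp [hk]
    have h0 : d0.getD k [] = [] := by
      rw [hd0, getD_foldl_insert_group (g := fun _ => ([] : List Int))]; simp
    have hB : dB.getD k [] = pvGroup arest k := by
      rw [hBfilter, PySem.Dict.getD_foldl_modify_append, h0, List.filter_filter]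
      have hcong : ∀ a ∈ arest, ((a.1 == k) && PySem.Set.contains (PySem.Set.ofList indices) a.1)
          = (a.1 == k) := by
        intro a _
        by_cases h : a.1 = k
        · simp [h, hk, PySem.Set.contains, PySem.Set.mem_ofList]
        · simp [h]
      rw [List.filter_congr hcong]
      simp [pvGroup]
    rw [hA, hB]
  -- compare the items lists
  rw [PySem.Dict.items_eq_map_keys dA hndA [], PySem.Dict.items_eq_map_keys dB hndB [],
    hkeysA, hkeysB]
  apply List.map_congr_left
  intro k hk
  have hk' : k ∈ indices := (PySem.Set.mem_ofList indices k).1 hk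
  rw [hval k hk']

-- ===== VERDICT (by name: the statement is the Claim_ definition above) =====
theorem popularLista_spec : Claim_equal_popularLista := by
  intro indices arest vert _ _
  unfold Spec_popularLista
  exact popularLista_spec' indices arest vert
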